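-- pv_equiv track=rewrite | github.com/BH-Fang/HomeWork | 114-1/020.py | getNumberPoint
-- ===== SOURCE A (Python) =====
-- def p10(indexOfNums, password):
--     good = True
--     if len(indexOfNums) < 5:
--         good = False
--     else:
--         for i in indexOfNums:
--             if (i + 1 < len(password) and password[i + 1].isdecimal()) or (i - 1 > -1 and password[i - 1].isdecimal()):
--                 good = False
--                 break
--     return good
--
-- def getNumberPoint(password):
--     indexOfNumbers = []
--     for index, ch in enumerate(password):
--         if ch.isdecimal():
--             indexOfNumbers.append(index)
--     point = len(indexOfNumbers) * 2
--     if p10(indexOfNumbers, password):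
--         point += 10
--     return point
-- ===== SOURCE B (Python) =====
-- def getNumberPoint(password):
--     count = 0
--     prev = False
--     adjacent = False
--     for ch in password:
--         d = ch.isdecimal()
--         if d and prev:
--             adjacent = True
--         if d:
--             count += 1
--         prev = d
--     point = count * 2
--     if count >= 5 and not adjacent:
--         point += 10
--     return point
-- ===== Notes on version B (the rewrite author's own statement) =====
-- stated objective: simpler
-- what changed: Replaced A's build-a-list-of-digit-indices plus a second scan (p10) that re-indexes the password around each stored index with a single pass keeping only an integer digit count, a previous-char-was-digit flag and an adjacency flag.
import Mathlib
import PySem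

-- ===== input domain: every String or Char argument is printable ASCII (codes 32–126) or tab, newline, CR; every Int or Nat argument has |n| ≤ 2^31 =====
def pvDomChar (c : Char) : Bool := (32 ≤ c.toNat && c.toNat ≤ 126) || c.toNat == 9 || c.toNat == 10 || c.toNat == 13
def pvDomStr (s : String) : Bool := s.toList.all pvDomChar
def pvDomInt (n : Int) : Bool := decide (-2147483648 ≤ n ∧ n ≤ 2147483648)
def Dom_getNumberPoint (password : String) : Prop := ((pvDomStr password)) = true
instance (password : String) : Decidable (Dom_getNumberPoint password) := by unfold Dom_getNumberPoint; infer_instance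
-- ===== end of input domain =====

-- B replaces A's digit-index list + second neighbour-scan (p10) by one pass keeping a count and two flags; objective: simpler.
-- ch.isdecimal() is ported as PySem.Chars.isdigit, exact on the ASCII domain (both are exactly '0'..'9' there).

-- ===== PORT A =====
-- password[i].isdecimal() — used only under the loop's explicit range guards, where pyGet? is some
def pvDecAt (l : List Char) (i : Int) : Bool :=
  ((PySem.List.pyGet? l i).map PySem.Chars.isdigit).getD false

-- the 'for i in indexOfNums: … break' loop of p10 (good starts True, break returns False)
def pvP10Loop (l : List Char) (idx : List Int) : Bool :=
  match idx with
  | [] => true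
  | i :: rest =>
      if ((decide (i + 1 < (l.length : Int))) && pvDecAt l (i + 1))
         || ((decide (i - 1 > -1)) && pvDecAt l (i - 1)) then false
      else pvP10Loop l rest

def pvP10 (indexOfNums : List Int) (password : String) : Bool :=
  if indexOfNums.length < 5 then false
  else pvP10Loop password.toList indexOfNums

def getNumberPoint (password : String) : Int :=
  let indexOfNumbers :=
    (PySem.List.enumerate password.toList 0).foldl
      (fun acc p => if PySem.Chars.isdigit p.2 then acc ++ [p.1] else acc) []
  let point : Int := (indexOfNumbers.length : Int) * 2
  if pvP10 indexOfNumbers password then point + 10 else point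

-- ===== PORT B =====
def getNumberPoint_alt (password : String) : Int :=
  let st := password.toList.foldl
    (fun (st : Int × Bool × Bool) c =>
      let d := PySem.Chars.isdigit c
      (st.1 + (if d then 1 else 0), d, st.2.2 || (st.2.1 && d)))
    (0, false, false)
  let point := st.1 * 2
  if decide (st.1 ≥ 5) && !st.2.2 then point + 10 else point

-- ===== PRECONDITION & SPEC =====
def Spec_getNumberPoint (password : String) (out : Int) : Prop := out = getNumberPoint_alt password
instance (password : String) (out : Int) : Decidable (Spec_getNumberPoint password out) := by unfold Spec_getNumberPoint; infer_instance

-- ===== CLAIM (what is proved, stated in full; the proofs are below) =====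
def Claim_equal_getNumberPoint : Prop := ∀ (password : String), Dom_getNumberPoint password → Spec_getNumberPoint password (getNumberPoint password)

-- ===== LEMMAS AND PROOFS =====

-- digit positions of l, offset by k (what A's enumerate-foldl builds)
def pvIdxFrom (k : Int) (l : List Char) : List Int :=
  match l with
  | [] => []
  | c :: t => (if PySem.Chars.isdigit c then [k] else []) ++ pvIdxFrom (k + 1) t

-- B's adjacency flag as a recursion: prev-was-digit p, then list
def pvAdjFrom (p : Bool) (l : List Char) : Bool :=
  match l with
  | [] => false
  | c :: t => (p && PySem.Chars.isdigit c) || pvAdjFrom (PySem.Chars.isdigit c) t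

-- B's last-char-was-digit flag
def pvLastDec (p : Bool) (l : List Char) : Bool :=
  match l with
  | [] => p
  | c :: t => pvLastDec (PySem.Chars.isdigit c) t

theorem pvFoldB (l : List Char) (c0 : Int) (p0 a0 : Bool) :
    l.foldl (fun (st : Int × Bool × Bool) c =>
      let d := PySem.Chars.isdigit c
      (st.1 + (if d then 1 else 0), d, st.2.2 || (st.2.1 && d))) (c0, p0, a0)
    = (c0 + (l.countP PySem.Chars.isdigit : Int), pvLastDec p0 l, a0 || pvAdjFrom p0 l) := by
  induction l generalizing c0 p0 a0 with
  | nil => simp [pvLastDec, pvAdjFrom]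
  | cons c t ih =>
      simp only [List.foldl_cons, ih, pvLastDec, pvAdjFrom, List.countP_cons]
      by_cases h : PySem.Chars.isdigit c <;> simp [h, Bool.or_assoc] <;> ring_nf

theorem pvEnumFold (l : List Char) (k : Int) (acc : List Int) :
    (PySem.List.enumerate l k).foldl
      (fun acc p => if PySem.Chars.isdigit p.2 then acc ++ [p.1] else acc) acc
    = acc ++ pvIdxFrom k l := by
  induction l generalizing k acc with
  | nil => simp [PySem.List.enumerate_nil, pvIdxFrom]
  | cons c t ih =>
      rw [PySem.List.enumerate_cons]
      by_cases h : PySem.Chars.isdigit c <;> simp [h, ih, pvIdxFrom]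

theorem pvIdxFrom_length (l : List Char) (k : Int) :
    (pvIdxFrom k l).length = l.countP PySem.Chars.isdigit := by
  induction l generalizing k with
  | nil => simp [pvIdxFrom]
  | cons c t ih =>
      by_cases h : PySem.Chars.isdigit c <;> simp [pvIdxFrom, h, ih, List.countP_cons]

theorem pvIdxFrom_mem (l : List Char) (k i : Int) :
    i ∈ pvIdxFrom k l ↔ ∃ j : Nat, ∃ h : j < l.length, i = k + j ∧ PySem.Chars.isdigit l[j] = true := by
  induction l generalizing k with
  | nil => simp [pvIdxFrom]
  | cons c t ih =>
      by_cases h : PySem.Chars.isdigit c = true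
      · simp only [pvIdxFrom, if_pos h, List.singleton_append, List.mem_cons, ih,
          List.length_cons]
        constructor
        · rintro (rfl | ⟨j, hj, rfl, hd⟩)
          · exact ⟨0, by omega, by simp, by simpa using h⟩
          · exact ⟨j + 1, by omega, by push_cast; ring, by simpa using hd⟩
        · rintro ⟨j, hj, rfl, hd⟩
          cases j with
          | zero => left; simp
          | succ j => right; exact ⟨j, by omega, by push_cast; ring, by simpa using hd⟩
      · simp only [pvIdxFrom, if_neg h, List.nil_append, ih, List.length_cons]
        constructor
        · rintro ⟨j, hj, rfl, hd⟩
          exact ⟨j + 1, by omega, by push_cast; ring, by simpa using hd⟩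
        · rintro ⟨j, hj, rfl, hd⟩
          cases j with
          | zero => exact absurd (by simpa using hd) (by simpa using h)
          | succ j => exact ⟨j, by omega, by push_cast; ring, by simpa using hd⟩

-- the loop with break computes "no element is bad"
theorem pvP10Loop_eq_any (l : List Char) (idx : List Int) :
    pvP10Loop l idx =
      !idx.any (fun i =>
        ((decide (i + 1 < (l.length : Int))) && pvDecAt l (i + 1))
        || ((decide (i - 1 > -1)) && pvDecAt l (i - 1))) := by
  induction idx with
  | nil => simp [pvP10Loop]
  | cons i rest ih =>
      rw [pvP10Loop]
      by_cases h : ((decide (i + 1 < (l.length : Int))) && pvDecAt l (i + 1))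
          || ((decide (i - 1 > -1)) && pvDecAt l (i - 1)) = true <;>
        simp [h, ih]

theorem pvDecAt_nat (l : List Char) (j : Nat) (hj : j < l.length) :
    pvDecAt l j = PySem.Chars.isdigit l[j] := by
  simp [pvDecAt, PySem.List.pyGet?_natCast, List.getElem?_eq_getElem hj]

-- B's adjacency flag holds iff some adjacent pair of digits exists
theorem pvAdjFrom_iff (l : List Char) (p : Bool) :
    pvAdjFrom p l = true ↔
      ((p = true ∧ ∃ h : 0 < l.length, PySem.Chars.isdigit l[0] = true)
       ∨ ∃ j : Nat, ∃ h : j + 1 < l.length,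
           PySem.Chars.isdigit l[j] = true ∧ PySem.Chars.isdigit l[j+1] = true) := by
  induction l generalizing p with
  | nil => simp [pvAdjFrom]
  | cons c t ih =>
      rw [pvAdjFrom]
      simp only [Bool.or_eq_true, Bool.and_eq_true, ih, List.length_cons]
      constructor
      · rintro (⟨hp, hc⟩ | (⟨hd, h0, hc⟩ | ⟨j, hj, h1, h2⟩))
        · exact Or.inl ⟨hp, by omega, hc⟩
        · exact Or.inr ⟨0, by omega, by simpa using hd, by simpa using hc⟩
        · exact Or.inr ⟨j + 1, by omega, by simpa using h1, by simpa using h2⟩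
      · rintro (⟨hp, h0, hc⟩ | ⟨j, hj, h1, h2⟩)
        · exact Or.inl ⟨hp, by simpa using hc⟩
        · cases j with
          | zero =>
              refine Or.inr (Or.inl ⟨by simpa using h1, by omega, ?_⟩)
              simpa using h2
          | succ j =>
              exact Or.inr (Or.inr ⟨j, by omega, by simpa using h1, by simpa using h2⟩)

-- A's "some stored index has a decimal neighbour" = B's adjacency flag
theorem pvAny_eq_adj (l : List Char) :
    ((pvIdxFrom 0 l).any (fun i =>
        ((decide (i + 1 < (l.length : Int))) && pvDecAt l (i + 1))
        || ((decide (i - 1 > -1)) && pvDecAt l (i - 1))))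
    = pvAdjFrom false l := by
  rw [Bool.eq_iff_iff, List.any_eq_true, pvAdjFrom_iff]
  constructor
  · rintro ⟨i, hi, hbad⟩
    rw [pvIdxFrom_mem] at hi
    obtain ⟨j, hj, rfl, hd⟩ := hi
    simp only [zero_add] at hbad ⊢
    rcases Bool.or_eq_true_iff.mp hbad with hR | hL
    · obtain ⟨hlt, hdec⟩ := Bool.and_eq_true_iff.mp hR
      have hlt' : j + 1 < l.length := by
        have := of_decide_eq_true hlt; exact_mod_cast (by omega : (j:Int) + 1 < l.length → _) this
      refine Or.inr ⟨j, hlt', hd, ?_⟩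
      have : ((j:Int) + 1) = ((j + 1 : Nat) : Int) := by push_cast; ring
      rw [this, pvDecAt_nat l (j+1) hlt'] at hdec
      exact hdec
    · obtain ⟨hgt, hdec⟩ := Bool.and_eq_true_iff.mp hL
      have hj0 : 1 ≤ j := by
        have := of_decide_eq_true hgt; omega
      obtain ⟨m, rfl⟩ : ∃ m, j = m + 1 := ⟨j - 1, by omega⟩
      have hlt' : m + 1 < l.length := hj
      have hcast : (((m + 1 : Nat) : Int)) - 1 = ((m : Nat) : Int) := by push_cast; ring
      rw [hcast, pvDecAt_nat l m (by omega)] at hdec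
      exact Or.inr ⟨m, hlt', hdec, hd⟩
  · rintro (⟨h, _⟩ | ⟨j, hj, h1, h2⟩)
    · exact absurd h (by simp)
    · refine ⟨(j : Int), ?_, ?_⟩
      · rw [pvIdxFrom_mem]
        exact ⟨j, by omega, by simp, h1⟩
      · apply Bool.or_eq_true_iff.mpr
        left
        apply Bool.and_eq_true_iff.mpr
        refine ⟨by simp; omega, ?_⟩
        have : ((j:Int) + 1) = ((j + 1 : Nat) : Int) := by push_cast; ring
        rw [this, pvDecAt_nat l (j+1) hj]
        exact h2

-- ===== VERDICT (by name: the statement is the Claim_ definition above) =====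
theorem getNumberPoint_spec : Claim_equal_getNumberPoint := by
  intro password _
  unfold Spec_getNumberPoint getNumberPoint getNumberPoint_alt
  rw [pvEnumFold, pvFoldB]
  simp only [List.nil_append, zero_add]
  set l := password.toList with hl
  rw [pvP10]
  rw [pvIdxFrom_length]
  rw [pvP10Loop_eq_any]
  rw [pvAny_eq_adj]
  set n := l.countP PySem.Chars.isdigit with hn
  by_cases h5 : n < 5
  · simp [h5, show ¬ ((5:Int) ≤ (n:Int)) by exact_mod_cast by omega]
  · simp only [h5, if_false]
    have : ((5:Int) ≤ (n:Int)) := by exact_mod_cast by omega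
    simp [this]
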